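-- pv_equiv track=rewrite | github.com/RuddyardCastro/ProyAutomatas | Clasificar.py | es_numero
-- ===== SOURCE A (Python) =====
-- def es_numero(palabra):
--     if not palabra:
--         return False
--     #  Verificar que después del - hay contenido
--     if palabra[0] == '-':
--         if len(palabra) == 1:  # Solo hay un signo negativo
--             return False
--         palabra = palabra[1:]
--
--     #  Manejar caso de punto decimal al inicio o final
--     if palabra.startswith('.') or palabra.endswith('.'):
--         return False
--
--     partes = palabra.split('.')
--     if len(partes) > 2:
--         return False
--     return all(p.isdigit() for p in partes if p)  #  validar partes no vacías
-- ===== SOURCE B (Python) =====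
-- def es_numero(palabra):
--     if not palabra:
--         return False
--     if palabra[0] == '-':
--         palabra = palabra[1:]
--         if not palabra:
--             return False
--     n = len(palabra)
--     dots = 0
--     for i, c in enumerate(palabra):
--         if c == '.':
--             if i == 0 or i == n - 1 or dots:
--                 return False
--             dots += 1
--         elif not c.isdigit():
--             return False
--     return True
-- ===== Notes on version B (the rewrite author's own statement) =====
-- stated objective: alternative
-- what changed: B replaces A's split-on-the-decimal-point-then-validate-parts decomposition by a single indexed pass over the characters with a dot counter (rejecting a dot at the first or last index or a second dot, and any non-digit).
import Mathlib
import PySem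

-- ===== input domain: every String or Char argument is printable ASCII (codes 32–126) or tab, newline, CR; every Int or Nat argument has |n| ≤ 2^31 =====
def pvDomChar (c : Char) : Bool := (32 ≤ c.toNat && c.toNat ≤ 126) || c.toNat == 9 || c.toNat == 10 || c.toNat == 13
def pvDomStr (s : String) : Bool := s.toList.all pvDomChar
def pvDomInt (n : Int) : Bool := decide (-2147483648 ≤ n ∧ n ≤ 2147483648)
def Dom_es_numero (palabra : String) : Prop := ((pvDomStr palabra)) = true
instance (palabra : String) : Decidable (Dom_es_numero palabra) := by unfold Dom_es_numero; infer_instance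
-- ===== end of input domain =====

-- B replaces A's split-on-the-decimal-point-and-check-parts decomposition by a single indexed pass with a dot counter; same return value, no speed claim.

-- ===== PORT A =====
-- literal transliteration of Source A on the character list
-- the code after the sign handling (A returns from inside it)
def es_numero_tail (cs : List Char) : Bool :=
  if PySem.Chars.startswith cs ['.'] || PySem.Chars.endswith cs ['.'] then false
  else
    let partes := PySem.Chars.splitOn cs ['.']
    if partes.length > 2 then false
    else (partes.filter (fun p => !p.isEmpty)).all PySem.Chars.strIsdigit

def es_numero_core (cs : List Char) : Bool :=
  if cs.isEmpty then false
  else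
    -- 'if palabra[0] == '-'': strip the sign, lone '-' returns False
    if PySem.List.pyGet? cs 0 = some '-' then
      if cs.length = 1 then false
      else es_numero_tail (PySem.List.slice cs (some 1) none)
    else es_numero_tail cs

def es_numero (palabra : String) : Bool := es_numero_core palabra.toList

-- ===== PORT B =====
-- the single pass of Source B: index i, total length n, dot counter
def es_numero_loop (n : Nat) : Nat → Nat → List Char → Bool
  | _, _, [] => true
  | i, dots, c :: rest =>
    if c = '.' then
      if i = 0 || i = n - 1 || dots ≠ 0 then false
      else es_numero_loop n (i + 1) (dots + 1) rest
    else if PySem.Chars.isdigit c then es_numero_loop n (i + 1) dots rest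
    else false

def es_numero_alt_core (cs : List Char) : Bool :=
  match cs with
  | [] => false
  | c :: rest =>
    let cs := if c = '-' then rest else cs
    if cs.isEmpty then false
    else es_numero_loop cs.length 0 0 cs

def es_numero_alt (palabra : String) : Bool := es_numero_alt_core palabra.toList

-- ===== PRECONDITION & SPEC =====
def Spec_es_numero (palabra : String) (out : Bool) : Prop := out = es_numero_alt palabra
instance (palabra : String) (out : Bool) : Decidable (Spec_es_numero palabra out) := by unfold Spec_es_numero; infer_instance

-- ===== CLAIM (what is proved, stated in full; the proofs are below) =====
def Claim_equal_es_numero : Prop := ∀ (palabra : String), Dom_es_numero palabra → Spec_es_numero palabra (es_numero palabra)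

-- ===== LEMMAS AND PROOFS =====

-- simple structural split on '.', proved equal to PySem.Chars.splitOn below
def split1 : List Char → List (List Char)
  | [] => [[]]
  | c :: t =>
    if c = '.' then [] :: split1 t
    else
      match split1 t with
      | [] => [[c]]
      | p :: ps => (c :: p) :: ps

lemma split1_ne_nil (cs : List Char) : split1 cs ≠ [] := by
  cases cs with
  | nil => simp [split1]
  | cons c t =>
    simp only [split1]
    split_ifs with h
    · simp
    · cases h' : split1 t <;> simp

def modHead (pre : List Char) : List (List Char) → List (List Char)
  | [] => [pre]
  | p :: ps => (pre ++ p) :: ps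

lemma go_eq_split1 (l : List Char) : ∀ (fuel : Nat) (cur : List Char) (acc : List (List Char)),
    l.length < fuel →
    PySem.Chars.splitOn.go ['.'] fuel l cur acc = acc.reverse ++ modHead cur.reverse (split1 l) := by
  induction l with
  | nil =>
    intro fuel cur acc hf
    match fuel, hf with
    | fuel + 1, _ => simp [PySem.Chars.splitOn.go, split1, modHead]
  | cons c rest ih =>
    intro fuel cur acc hf
    match fuel, hf with
    | fuel + 1, hf =>
      have hrest : rest.length < fuel := by simp at hf; omega
      by_cases hc : c = '.'
      · subst hc
        have hpre : List.isPrefixOf ['.'] ('.' :: rest) = true := by simp [List.isPrefixOf]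
        simp only [PySem.Chars.splitOn.go, hpre, if_pos, List.length_nil, List.drop_zero,
          List.length_cons, List.drop_succ_cons]
        rw [ih fuel [] (cur.reverse :: acc) hrest]
        simp [split1]
        cases h' : split1 rest with
        | nil => exact absurd h' (split1_ne_nil rest)
        | cons p ps => simp [modHead]
      · have hpre : List.isPrefixOf ['.'] (c :: rest) = false := by
          simp [List.isPrefixOf]; exact fun h => absurd h.symm hc
        simp only [PySem.Chars.splitOn.go, hpre, Bool.false_eq_true, if_neg, not_false_iff]
        rw [ih fuel (c :: cur) acc hrest]
        simp only [split1, hc, if_neg, not_false_iff]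
        cases h' : split1 rest with
        | nil => exact absurd h' (split1_ne_nil rest)
        | cons p ps => simp [modHead]

lemma splitOn_eq_split1 (cs : List Char) : PySem.Chars.splitOn cs ['.'] = split1 cs := by
  rw [PySem.Chars.splitOn, go_eq_split1 cs (cs.length + 1) [] [] (by omega)]
  cases h' : split1 cs with
  | nil => exact absurd h' (split1_ne_nil cs)
  | cons p ps => simp [modHead]

-- the common characterisation both ports reduce to
def goodChar (c : Char) : Bool := c == '.' || PySem.Chars.isdigit c

def good (cs : List Char) : Bool :=
  decide (cs.head? ≠ some '.') && decide (cs.getLast? ≠ some '.')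
    && decide (cs.count '.' ≤ 1) && cs.all goodChar

lemma split1_length (cs : List Char) : (split1 cs).length = cs.count '.' + 1 := by
  induction cs with
  | nil => simp [split1]
  | cons c t ih =>
    by_cases hc : c = '.'
    · subst hc; simp [split1, ih]
    · simp only [split1, hc, if_neg, not_false_iff]
      cases h' : split1 t with
      | nil => exact absurd h' (split1_ne_nil t)
      | cons p ps =>
        rw [h'] at ih
        simp only [List.count_cons, List.length_cons] at *
        simp [hc, ih]

lemma split1_filter_all (cs : List Char) :
    ((split1 cs).filter (fun p => !p.isEmpty)).all PySem.Chars.strIsdigit = cs.all goodChar := by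
  induction cs with
  | nil => simp [split1]
  | cons c t ih =>
    by_cases hc : c = '.'
    · subst hc; simpa [split1, goodChar] using ih
    · simp only [split1, hc, if_neg, not_false_iff]
      have hbe : (c == '.') = false := by simp [hc]
      cases h' : split1 t with
      | nil => exact absurd h' (split1_ne_nil t)
      | cons p ps =>
        rw [h'] at ih
        cases p with
        | nil =>
          simp only [List.filter_cons, List.isEmpty_nil, Bool.not_true, Bool.false_eq_true,
            if_neg, not_false_iff, List.isEmpty_cons, Bool.not_false, if_pos] at ih ⊢
          simp [PySem.Chars.strIsdigit, goodChar, hbe, ← ih]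
        | cons d q =>
          simp only [List.filter_cons, List.isEmpty_cons, Bool.not_false, if_pos, List.all_cons] at ih ⊢
          simp [PySem.Chars.strIsdigit, goodChar, hbe, ← ih, Bool.and_assoc]

-- step equations of the B loop
lemma loop_nil (n i dots : Nat) : es_numero_loop n i dots [] = true := rfl

lemma loop_cons (n i dots : Nat) (c : Char) (rest : List Char) :
    es_numero_loop n i dots (c :: rest) =
      (if c = '.' then
        if i = 0 || i = n - 1 || dots ≠ 0 then false
        else es_numero_loop n (i + 1) (dots + 1) rest
      else if PySem.Chars.isdigit c then es_numero_loop n (i + 1) dots rest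
      else false) := rfl

lemma endswith_singleton (ys : List Char) (y a : Char) :
    PySem.Chars.endswith (ys ++ [y]) [a] = (y == a) := by
  simp [PySem.Chars.endswith, List.isSuffixOf, List.isPrefixOf, eq_comm]

-- A-side: the core equals `good` on nonempty input
lemma acore_eq_good (cs : List Char) (h : cs ≠ []) :
    es_numero_tail cs = good cs := by
  unfold es_numero_tail
  obtain ⟨ys, y, rfl⟩ := (List.eq_nil_or_concat cs).resolve_left h
  simp only [List.concat_eq_append]
  have hend : PySem.Chars.endswith (ys ++ [y]) ['.'] = ((ys ++ [y]).getLast? == some '.') := by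
    rw [endswith_singleton, List.getLast?_concat]
    cases hy : y == '.' <;> simp_all
  have hstart : PySem.Chars.startswith (ys ++ [y]) ['.'] = ((ys ++ [y]).head? == some '.') := by
    cases ys with
    | nil => simp [PySem.Chars.startswith, List.isPrefixOf, eq_comm]
    | cons a u => simp [PySem.Chars.startswith, List.isPrefixOf, eq_comm]
  have hheq : (ys ++ [y]).head? = some (ys.head?.getD y) := by cases ys <;> simp
  have hleq : (ys ++ [y]).getLast? = some y := by simp
  simp only [splitOn_eq_split1, split1_length, split1_filter_all, hstart, hend, hheq, hleq]
  by_cases hs : ys.head?.getD y = '.'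
  · simp [good, hs]
  · by_cases he : y = '.'
    · simp [good, he]
    · have hss : ((some (ys.head?.getD y)) == some '.') = false := by simp [hs]
      have hee : ((some y) == some '.') = false := by simp [he]
      rw [hss, hee]
      simp only [Bool.or_self, Bool.false_eq_true, if_neg, not_false_iff]
      have hcy : List.count '.' [y] = 0 := by simp [he]
      by_cases hcnt : (ys ++ [y]).count '.' ≤ 1
      · have hC : List.count '.' ys + List.count '.' [y] ≤ 1 := by
          simpa [List.count_append] using hcnt
        have hC1 : List.count '.' ys ≤ 1 := by omega
        have h2 : ¬ ((ys ++ [y]).count '.' + 1 > 2) := by omega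
        have h2C : ¬ 2 ≤ List.count '.' ys + List.count '.' [y] := by omega
        have h2D : ¬ 2 ≤ List.count '.' ys := by omega
        simp [good, hheq, hleq, hs, he, hC1]
      · have hC : ¬ List.count '.' ys + List.count '.' [y] ≤ 1 := by
          simpa [List.count_append] using hcnt
        have hC1 : ¬ List.count '.' ys ≤ 1 := by omega
        have h2 : (ys ++ [y]).count '.' + 1 > 2 := by omega
        have h2C : 2 ≤ List.count '.' ys + List.count '.' [y] := by omega
        have h2D : 2 ≤ List.count '.' ys := by omega
        simp [good, hheq, hleq, hC]

-- B-side: dots ≠ 0 ⇒ any further '.' rejects, so the loop is plain all-digits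
lemma loop_of_dots_pos (rest : List Char) : ∀ (n i dots : Nat), dots ≠ 0 →
    es_numero_loop n i dots rest = rest.all PySem.Chars.isdigit := by
  induction rest with
  | nil => intro n i dots _; simp [loop_nil]
  | cons c t ih =>
    intro n i dots hd
    rw [loop_cons]
    by_cases hc : c = '.'
    · subst hc
      have hdig : PySem.Chars.isdigit '.' = false := by decide
      simp [hd, hdig]
    · rw [if_neg hc]
      by_cases hdig : PySem.Chars.isdigit c
      · simp [hdig, ih n (i + 1) dots hd]
      · simp [hdig]

lemma all_digit_facts (t : List Char) (h : t.all PySem.Chars.isdigit = true) :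
    t.count '.' = 0 ∧ t.getLast? ≠ some '.' ∧ t.all goodChar = true := by
  have hdot : '.' ∉ t := by
    intro hm
    have := List.all_eq_true.mp h '.' hm
    simp [PySem.Chars.isdigit] at this
  refine ⟨List.count_eq_zero.mpr hdot, ?_, ?_⟩
  · intro hl
    exact hdot (List.mem_of_getLast? hl)
  · refine List.all_eq_true.mpr fun c hc => ?_
    simp [goodChar, List.all_eq_true.mp h c hc]

-- B-side: the loop started at i over a suffix of length rest.length of a string of total length i + rest.length
lemma loop_char (rest : List Char) : ∀ (i : Nat),
    es_numero_loop (i + rest.length) i 0 rest =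
      ((if i = 0 then decide (rest.head? ≠ some '.') else true)
        && decide (rest.getLast? ≠ some '.')
        && decide (rest.count '.' ≤ 1)
        && rest.all goodChar) := by
  induction rest with
  | nil => intro i; simp [loop_nil]
  | cons c t ih =>
    intro i
    rw [loop_cons]
    by_cases hc : c = '.'
    · subst hc
      rw [if_pos rfl]
      by_cases hi : i = 0
      · have hcond : (decide (i = 0) || decide (i = i + ('.' :: t).length - 1) || decide ((0:Nat) ≠ 0)) = true := by
          simp [hi]
        rw [hcond, if_pos rfl]
        simp [hi]
      · cases t with
        | nil =>
          have hcond : (decide (i = 0) || decide (i = i + ('.' :: ([] : List Char)).length - 1) || decide ((0:Nat) ≠ 0)) = true := by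
            simp
          rw [hcond, if_pos rfl]
          simp
        | cons d q =>
          have hcond : (decide (i = 0) || decide (i = i + ('.' :: d :: q).length - 1) || decide ((0:Nat) ≠ 0)) = false := by
            simp only [List.length_cons, Bool.or_eq_false_iff, decide_eq_false_iff_not]
            refine ⟨⟨hi, by omega⟩, by simp⟩
          rw [hcond]
          simp only [Bool.false_eq_true, if_neg, not_false_iff]
          rw [loop_of_dots_pos (d :: q) (i + ('.' :: d :: q).length) (i + 1) (0 + 1) (by omega)]
          by_cases hall : (d :: q).all PySem.Chars.isdigit = true
          · obtain ⟨hcnt, hlast', hgood⟩ := all_digit_facts (d :: q) hall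
            have hh : ('.' :: d :: q).getLast? = (d :: q).getLast? := by simp
            simp [hall, hi, hh, hlast', hcnt, hgood, goodChar]
          · have hall' : (d :: q).all PySem.Chars.isdigit = false := by simpa using hall
            rw [hall', eq_comm]
            by_cases hcnt : (d :: q).count '.' = 0
            · have hdot : '.' ∉ (d :: q) := List.count_eq_zero.mp hcnt
              obtain ⟨x, hx, hxd⟩ := List.all_eq_false.mp hall'
              have hxg : goodChar x = false := by
                simp only [goodChar, Bool.or_eq_false_iff, beq_eq_false_iff_ne, ne_eq]
                exact ⟨fun hxe => hdot (hxe ▸ hx), by simpa using hxd⟩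
              have hgf : ('.' :: d :: q).all goodChar = false := by
                apply List.all_eq_false.mpr
                exact ⟨x, List.mem_cons_of_mem _ hx, by simp [hxg]⟩
              simp [hgf]
            · have hge : ¬ (List.count '.' ('.' :: d :: q) ≤ 1) := by
                simp only [List.count_cons_self]
                omega
              have hdec : decide (('.' :: d :: q).count '.' ≤ 1) = false := by
                simpa using hge
              simp only [hdec, Bool.and_false, Bool.false_and]
    · rw [if_neg hc]
      by_cases hdig : PySem.Chars.isdigit c
      · rw [if_pos hdig]
        have hlen : i + (c :: t).length = (i + 1) + t.length := by simp; omega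
        rw [hlen, ih (i + 1)]
        cases t with
        | nil =>
          have hgl : (c :: ([] : List Char)).getLast? = some c := by simp
          simp [hgl, hc, goodChar, hdig]
        | cons d q =>
          have hh : (c :: d :: q).getLast? = (d :: q).getLast? := by simp
          by_cases hi : i = 0
          · simp [hi, hh, List.count_cons, hc, goodChar, hdig, Bool.and_assoc]
          · simp [hi, hh, List.count_cons, hc, goodChar, hdig, Bool.and_assoc]
      · have hg : goodChar c = false := by simp [goodChar, hc, hdig]
        simp [hdig, hg]

lemma bcore_eq_good (cs : List Char) (h : cs ≠ []) :
    es_numero_loop cs.length 0 0 cs = good cs := by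
  have hlc := loop_char cs 0
  simp only [Nat.zero_add] at hlc
  rw [hlc, good]
  cases cs with
  | nil => exact absurd rfl h
  | cons c t => simp [Bool.and_assoc]

-- ===== VERDICT (by name: the statement is the Claim_ definition above) =====
theorem es_numero_spec : Claim_equal_es_numero := by
  intro palabra _
  unfold Spec_es_numero es_numero es_numero_alt es_numero_core es_numero_alt_core
  cases hcs : palabra.toList with
  | nil => simp
  | cons c t =>
    simp only [List.isEmpty_cons, Bool.false_eq_true, if_neg, not_false_iff]
    by_cases hminus : c = '-'
    · subst hminus
      cases t with
      | nil => decide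
      | cons d q =>
        have h1 : (PySem.List.pyGet? ('-' :: d :: q) 0 = some '-') = True := by
          have h0 : (0 : Int) ≤ (q.length : Int) + 1 := by omega
          simp [PySem.List.pyGet?, PySem.List.pyIdx?, h0]
        have h2 : (('-' :: d :: q).length = 1) = False := by simp
        have h4 : ((d :: q).isEmpty = true) = False := by simp
        simp only [h1, h2, h4, if_true, if_false, PySem.List.slice_from_one, List.tail_cons]
        rw [acore_eq_good (d :: q) (by simp), bcore_eq_good (d :: q) (by simp)]
    · have h1 : (PySem.List.pyGet? (c :: t) 0 = some '-') = False := by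
        have h0 : (0 : Int) ≤ (t.length : Int) + 1 := by omega
        simp [PySem.List.pyGet?, PySem.List.pyIdx?, hminus]
      have h2 : ((c = '-')) = False := by simp [hminus]
      have h4 : ((c :: t).isEmpty = true) = False := by simp
      simp only [h1, h2, h4, if_false]
      rw [acore_eq_good (c :: t) (by simp), bcore_eq_good (c :: t) (by simp)]
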